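-- pv_equiv track=rewrite | github.com/engkinandatama/primerlab-genomic | primerlab/core/rtpcr/exon_junction.py | find_junction_position
-- ===== SOURCE A (Python) =====
-- from typing import Optional, List, Dict, Tuple
--
-- def find_junction_position(
--     primer_start: int,
--     primer_end: int,
--     exon_boundaries: List[Tuple[int, int]],
-- ) -> Optional[Tuple[int, int, int]]:
--     """
--     Find if primer spans an exon junction.
--
--     Args:
--         primer_start: Start position in transcript (0-indexed)
--         primer_end: End position (exclusive)
--         exon_boundaries: List of (start, end) for each exon
--
--     Returns:
--         Tuple of (junction_pos_in_primer, exon_5prime_idx, exon_3prime_idx) or None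
--     """
--     # Sort exons by start position
--     sorted_exons = sorted(enumerate(exon_boundaries), key=lambda x: x[1][0])
--
--     for i, (exon_idx, (exon_start, exon_end)) in enumerate(sorted_exons):
--         # Check if primer end is past this exon end
--         if primer_start < exon_end <= primer_end:
--             # Primer spans this junction
--             junction_pos_in_primer = exon_end - primer_start
--
--             # Find next exon
--             if i + 1 < len(sorted_exons):
--                 next_exon_idx = sorted_exons[i + 1][0]
--                 return (junction_pos_in_primer, exon_idx, next_exon_idx)
--
--     return None
-- ===== SOURCE B (Python) =====
-- def _min_candidate(pred, exons):
--     # first pass pattern: minimal (start, index) among elements satisfying pred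
--     best = None  # (idx, start, end)
--     for idx, (es, ee) in enumerate(exons):
--         if pred(idx, es, ee) and (best is None or (es, idx) < (best[1], best[0])):
--             best = (idx, es, ee)
--     return best
--
--
-- def find_junction_position(primer_start, primer_end, exon_boundaries):
--     # No sort: pick the matching exon minimal in (start, original_index) --
--     # the one the sorted scan would reach first -- then find its successor
--     # in that order with a second linear pass.
--     best = _min_candidate(lambda i, s, e: primer_start < e <= primer_end,
--                           exon_boundaries)
--     if best is None:
--         return None
--     bi, bs, be = best
--     succ = _min_candidate(lambda i, s, e: (bs, bi) < (s, i), exon_boundaries)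
--     if succ is None:
--         return None
--     return (be - primer_start, bi, succ[0])
-- ===== Notes on version B (the rewrite author's own statement) =====
-- stated objective: alternative
-- what changed: Replaces sort-then-scan with two linear passes: an argmin over (start, original_index) picks the matching exon the sorted loop would hit first, and a second pass finds its in-order successor.
import Mathlib
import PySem

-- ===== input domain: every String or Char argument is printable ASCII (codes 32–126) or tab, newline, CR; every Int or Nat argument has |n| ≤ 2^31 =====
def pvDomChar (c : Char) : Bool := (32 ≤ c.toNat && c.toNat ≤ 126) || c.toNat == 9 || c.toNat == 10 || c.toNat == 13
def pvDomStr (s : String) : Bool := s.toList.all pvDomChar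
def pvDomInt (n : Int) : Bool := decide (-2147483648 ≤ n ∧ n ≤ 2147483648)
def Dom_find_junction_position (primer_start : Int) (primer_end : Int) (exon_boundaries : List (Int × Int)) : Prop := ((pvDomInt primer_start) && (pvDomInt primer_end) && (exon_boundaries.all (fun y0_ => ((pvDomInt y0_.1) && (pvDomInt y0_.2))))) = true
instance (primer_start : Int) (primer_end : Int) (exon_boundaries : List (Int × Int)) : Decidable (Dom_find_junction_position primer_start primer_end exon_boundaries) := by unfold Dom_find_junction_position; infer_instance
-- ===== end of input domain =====

-- B removes the sort: two linear passes (argmin by (start, original index), then its in-order successor) replace A's sort-then-scan.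


-- ===== PORT A =====
-- A's for-loop over the stable sort; 'i + 1 < len(sorted_exons)' is 'rest ≠ []'
-- and 'sorted_exons[i + 1]' is the head of rest (the element after the current one).
def fjpLoopA (ps pe : Int) : List (Int × Int × Int) → Option (Int × Int × Int)
  | [] => none
  | x :: rest =>
    if ps < x.2.2 ∧ x.2.2 ≤ pe then
      match rest with
      | n :: _ => some (x.2.2 - ps, x.1, n.1)
      | [] => fjpLoopA ps pe rest
    else fjpLoopA ps pe rest

def find_junction_position (primer_start : Int) (primer_end : Int) (exon_boundaries : List (Int × Int)) : Option (Int × Int × Int) :=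
  fjpLoopA primer_start primer_end
    (PySem.List.sorted (PySem.List.enumerate exon_boundaries 0) (fun p => p.2.1))

-- ===== PORT B =====
-- loop body of Source B's _min_candidate
def fjpStep (p : Int × Int × Int → Bool) (acc : Option (Int × Int × Int)) (x : Int × Int × Int) : Option (Int × Int × Int) :=
  if p x && (match acc with
             | none => true
             | some b => decide (x.2.1 < b.2.1 ∨ (x.2.1 = b.2.1 ∧ x.1 < b.1))) then some x else acc

-- Source B's _min_candidate: minimal (start, index) among elements satisfying p
def fjpMinBy (p : Int × Int × Int → Bool) (l : List (Int × Int × Int)) : Option (Int × Int × Int) :=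
  l.foldl (fjpStep p) none

def find_junction_position_alt (primer_start : Int) (primer_end : Int) (exon_boundaries : List (Int × Int)) : Option (Int × Int × Int) :=
  match fjpMinBy (fun x => decide (primer_start < x.2.2 ∧ x.2.2 ≤ primer_end))
          (PySem.List.enumerate exon_boundaries 0) with
  | none => none
  | some b =>
    match fjpMinBy (fun x => decide (b.2.1 < x.2.1 ∨ (b.2.1 = x.2.1 ∧ b.1 < x.1)))
            (PySem.List.enumerate exon_boundaries 0) with
    | none => none
    | some c => some (b.2.2 - primer_start, b.1, c.1)

-- ===== PRECONDITION & SPEC =====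
def Spec_find_junction_position (primer_start : Int) (primer_end : Int) (exon_boundaries : List (Int × Int)) (out : Option (Int × Int × Int)) : Prop := out = find_junction_position_alt primer_start primer_end exon_boundaries
instance (primer_start : Int) (primer_end : Int) (exon_boundaries : List (Int × Int)) (out : Option (Int × Int × Int)) : Decidable (Spec_find_junction_position primer_start primer_end exon_boundaries out) := by unfold Spec_find_junction_position; infer_instance

-- ===== CLAIM (what is proved, stated in full; the proofs are below) =====
def Claim_equal_find_junction_position : Prop := ∀ (primer_start : Int) (primer_end : Int) (exon_boundaries : List (Int × Int)), Dom_find_junction_position primer_start primer_end exon_boundaries → Spec_find_junction_position primer_start primer_end exon_boundaries (find_junction_position primer_start primer_end exon_boundaries)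

-- ===== LEMMAS AND PROOFS =====

-- the strict total order "(start, index) lexicographically smaller"
def fjpKlt (a b : Int × Int × Int) : Prop := a.2.1 < b.2.1 ∨ (a.2.1 = b.2.1 ∧ a.1 < b.1)

theorem fjpKlt_irrefl (a : Int × Int × Int) : ¬ fjpKlt a a := by unfold fjpKlt; omega

theorem fjpKlt_asymm {a b : Int × Int × Int} : fjpKlt a b → ¬ fjpKlt b a := by
  unfold fjpKlt; omega

theorem fjpKlt_trans {a b c : Int × Int × Int} : fjpKlt a b → fjpKlt b c → fjpKlt a c := by
  unfold fjpKlt; omega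

theorem fjpKlt_total {a b : Int × Int × Int} (h : a.1 ≠ b.1) : fjpKlt a b ∨ fjpKlt b a := by
  unfold fjpKlt; omega

-- members of an enumeration with equal index are equal
theorem enumerate_fst_inj {xs : List (Int × Int)} {a b : Int × Int × Int}
    (ha : a ∈ PySem.List.enumerate xs 0) (hb : b ∈ PySem.List.enumerate xs 0)
    (h : a.1 = b.1) : a = b := by
  rw [PySem.List.mem_enumerate_iff] at ha hb
  obtain ⟨k, hk, rfl⟩ := ha
  obtain ⟨j, hj, rfl⟩ := hb
  simp only [zero_add] at h ⊢
  have : k = j := by exact_mod_cast h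
  subst this; rfl

-- ===== B-side: the fold computes a minimal satisfying element =====

theorem fjpStep_cases (p : Int × Int × Int → Bool) (acc : Option (Int × Int × Int)) (x : Int × Int × Int) :
    (fjpStep p acc x = some x ∧ p x = true ∧ (∀ b, acc = some b → fjpKlt x b)) ∨
    (fjpStep p acc x = acc ∧ (p x = true → ∃ b, acc = some b ∧ ¬ fjpKlt x b)) := by
  cases acc with
  | none =>
    by_cases hpx : p x = true
    · exact Or.inl ⟨by simp [fjpStep, hpx], hpx, fun b hb => by cases hb⟩
    · exact Or.inr ⟨by simp [fjpStep, hpx], fun h => absurd h hpx⟩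
  | some b =>
    by_cases hk : fjpKlt x b
    · by_cases hpx : p x = true
      · refine Or.inl ⟨?_, hpx, fun b' hb' => by cases hb'; exact hk⟩
        have hk' : decide (x.2.1 < b.2.1 ∨ (x.2.1 = b.2.1 ∧ x.1 < b.1)) = true := decide_eq_true hk
        simp [fjpStep, hpx, hk']
      · exact Or.inr ⟨by simp [fjpStep, hpx], fun h => absurd h hpx⟩
    · refine Or.inr ⟨?_, fun _ => ⟨b, rfl, hk⟩⟩
      have hk' : decide (x.2.1 < b.2.1 ∨ (x.2.1 = b.2.1 ∧ x.1 < b.1)) = false :=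
        decide_eq_false hk
      simp [fjpStep, hk']

theorem fjpStep_foldl_some (p : Int × Int × Int → Bool) :
    ∀ (l : List (Int × Int × Int)) (b : Int × Int × Int),
      ∃ m, l.foldl (fjpStep p) (some b) = some m := by
  intro l
  induction l with
  | nil => exact fun b => ⟨b, rfl⟩
  | cons x t ih =>
    intro b
    simp only [List.foldl_cons]
    rcases fjpStep_cases p (some b) x with ⟨hstep, -, -⟩ | ⟨hstep, -⟩ <;> rw [hstep]
    · exact ih x
    · exact ih b

theorem fjpMinBy_prop (p : Int × Int × Int → Bool) :
    ∀ (l : List (Int × Int × Int)) (acc : Option (Int × Int × Int)) (m : Int × Int × Int),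
      l.foldl (fjpStep p) acc = some m →
      ((m ∈ l ∧ p m = true) ∨ acc = some m) ∧
      (∀ b, acc = some b → m = b ∨ fjpKlt m b) ∧
      (∀ x ∈ l, p x = true → ¬ fjpKlt x m) := by
  intro l
  induction l with
  | nil =>
    intro acc m h
    simp only [List.foldl_nil] at h
    exact ⟨Or.inr h, fun b hb => Or.inl (Option.some.inj (h.symm.trans hb)), by simp⟩
  | cons x t ih =>
    intro acc m h
    simp only [List.foldl_cons] at h
    rcases fjpStep_cases p acc x with ⟨hstep, hpx, hmin⟩ | ⟨hstep, hrefuse⟩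
    · -- step took x
      rw [hstep] at h
      obtain ⟨H1, H2, H3⟩ := ih (some x) m h
      have hmx : m = x ∨ fjpKlt m x := H2 x rfl
      refine ⟨?_, ?_, ?_⟩
      · rcases H1 with ⟨hm, hpm⟩ | hax
        · exact Or.inl ⟨List.mem_cons_of_mem _ hm, hpm⟩
        · have hmx' : m = x := (Option.some.inj hax).symm
          exact Or.inl ⟨hmx' ▸ List.mem_cons_self, hmx' ▸ hpx⟩
      · intro b hb
        have hxb : fjpKlt x b := hmin b hb
        rcases hmx with rfl | hmx
        · exact Or.inr hxb
        · exact Or.inr (fjpKlt_trans hmx hxb)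
      · intro y hy hpy
        rcases List.mem_cons.mp hy with rfl | hyt
        · rcases hmx with rfl | hmx
          · exact fjpKlt_irrefl m
          · exact fun hk => fjpKlt_asymm hk hmx
        · exact H3 y hyt hpy
    · -- step kept acc
      rw [hstep] at h
      obtain ⟨H1, H2, H3⟩ := ih acc m h
      refine ⟨?_, H2, ?_⟩
      · rcases H1 with ⟨hm, hpm⟩ | hax
        · exact Or.inl ⟨List.mem_cons_of_mem _ hm, hpm⟩
        · exact Or.inr hax
      · intro y hy hpy
        rcases List.mem_cons.mp hy with rfl | hyt
        · obtain ⟨b, hacc, hnxb⟩ := hrefuse hpy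
          rcases H2 b hacc with rfl | hmb
          · exact hnxb
          · exact fun hk => hnxb (fjpKlt_trans hk hmb)
        · exact H3 y hyt hpy

theorem fjpMinBy_none {p : Int × Int × Int → Bool} :
    ∀ {l : List (Int × Int × Int)}, fjpMinBy p l = none → ∀ x ∈ l, p x = false := by
  intro l
  induction l with
  | nil => intro _ x hx; cases hx
  | cons x t ih =>
    intro h y hy
    unfold fjpMinBy at h
    simp only [List.foldl_cons] at h
    have hpx : p x = false := by
      by_contra hne
      have hpx : p x = true := by revert hne; cases p x <;> simp
      have hstep : fjpStep p none x = some x := by simp [fjpStep, hpx]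
      rw [hstep] at h
      obtain ⟨m, hm⟩ := fjpStep_foldl_some p t x
      rw [hm] at h; cases h
    have hstep : fjpStep p none x = none := by simp [fjpStep, hpx]
    rw [hstep] at h
    rcases List.mem_cons.mp hy with rfl | hyt
    · exact hpx
    · exact ih h y hyt

-- ===== A-side: behaviour of the scan over a strictly (start, index)-ordered list =====

theorem loopA_eq_none (ps pe : Int) :
    ∀ (t : List (Int × Int × Int)), t.Pairwise fjpKlt →
      (∀ x ∈ t, (ps < x.2.2 ∧ x.2.2 ≤ pe) → ∀ y ∈ t, ¬ fjpKlt x y) →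
      fjpLoopA ps pe t = none := by
  intro t
  induction t with
  | nil => intro _ _; rfl
  | cons x rest ih =>
    intro hpw h
    obtain ⟨hxr, hpr⟩ := List.pairwise_cons.mp hpw
    by_cases hcond : ps < x.2.2 ∧ x.2.2 ≤ pe
    · have hrest : rest = [] := by
        cases hr : rest with
        | nil => rfl
        | cons n r =>
          exact absurd (hxr n (by rw [hr]; exact List.mem_cons_self))
            (h x List.mem_cons_self hcond n (by rw [hr]; exact List.mem_cons_of_mem _ List.mem_cons_self))
      subst hrest
      simp [fjpLoopA, hcond]
    · have : fjpLoopA ps pe (x :: rest) = fjpLoopA ps pe rest := by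
        simp [fjpLoopA, hcond]
      rw [this]
      exact ih hpr (fun z hz hcz y hy =>
        h z (List.mem_cons_of_mem _ hz) hcz y (List.mem_cons_of_mem _ hy))

theorem loopA_eq_some (ps pe : Int) :
    ∀ (t : List (Int × Int × Int)) (b c : Int × Int × Int), t.Pairwise fjpKlt →
      b ∈ t → (ps < b.2.2 ∧ b.2.2 ≤ pe) →
      (∀ x ∈ t, (ps < x.2.2 ∧ x.2.2 ≤ pe) → ¬ fjpKlt x b) →
      c ∈ t → fjpKlt b c →
      (∀ x ∈ t, fjpKlt b x → ¬ fjpKlt x c) →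
      fjpLoopA ps pe t = some (b.2.2 - ps, b.1, c.1) := by
  intro t
  induction t with
  | nil => intro b c _ hb; cases hb
  | cons x rest ih =>
    intro b c hpw hb hcb hmin hc hbc hcmin
    obtain ⟨hxr, hpr⟩ := List.pairwise_cons.mp hpw
    rcases List.mem_cons.mp hb with rfl | hbr
    · -- head is b
      have hcr : c ∈ rest := by
        rcases List.mem_cons.mp hc with rfl | hcr
        · exact absurd hbc (fjpKlt_irrefl c)
        · exact hcr
      cases hr : rest with
      | nil => rw [hr] at hcr; cases hcr
      | cons n r =>
        have hn : n = c := by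
          rw [hr] at hcr
          rcases List.mem_cons.mp hcr with rfl | hcr'
          · rfl
          · have hbn : fjpKlt b n := hxr n (by rw [hr]; exact List.mem_cons_self)
            have hnc : fjpKlt n c := by
              rw [hr] at hpr
              exact (List.pairwise_cons.mp hpr).1 c hcr'
            exact absurd hnc (hcmin n (by rw [hr]; exact List.mem_cons_of_mem _ List.mem_cons_self) hbn)
        subst hn
        simp [fjpLoopA, hcb]
    · -- head is before b, hence fails the condition
      have hxb : fjpKlt x b := hxr b hbr
      have hncond : ¬ (ps < x.2.2 ∧ x.2.2 ≤ pe) :=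
        fun hcx => (hmin x List.mem_cons_self hcx) hxb
      have hcr : c ∈ rest := by
        rcases List.mem_cons.mp hc with rfl | hcr
        · exact absurd hxb (fjpKlt_asymm hbc)
        · exact hcr
      have : fjpLoopA ps pe (x :: rest) = fjpLoopA ps pe rest := by
        simp [fjpLoopA, hncond]
      rw [this]
      exact ih b c hpr hbr hcb
        (fun z hz hcz => hmin z (List.mem_cons_of_mem _ hz) hcz) hcr hbc
        (fun z hz hbz => hcmin z (List.mem_cons_of_mem _ hz) hbz)

-- ===== stability: the stable sort by start is strictly (start, index)-increasing =====

theorem insertBy_pw (x : Int × Int × Int) :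
    ∀ (acc : List (Int × Int × Int)), acc.Pairwise fjpKlt → (∀ a ∈ acc, a.1 < x.1) →
      (PySem.List.insertBy (fun a b => decide (a.2.1 < b.2.1)) x acc).Pairwise fjpKlt := by
  intro acc
  induction acc with
  | nil => intro _ _; simp [PySem.List.insertBy]
  | cons y ys ih =>
    intro hpw hidx
    obtain ⟨hyr, hpr⟩ := List.pairwise_cons.mp hpw
    rw [PySem.List.insertBy]
    by_cases hxy : x.2.1 < y.2.1
    · simp only [hxy, decide_true, if_true]
      refine List.pairwise_cons.mpr ⟨?_, hpw⟩
      intro z hz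
      rcases List.mem_cons.mp hz with rfl | hzy
      · exact Or.inl hxy
      · have := hyr z hzy
        unfold fjpKlt at this ⊢; omega
    · simp only [hxy, decide_false]
      refine List.pairwise_cons.mpr ⟨?_, ih hpr (fun a ha => hidx a (List.mem_cons_of_mem _ ha))⟩
      intro z hz
      rcases (PySem.List.mem_insertBy _ _ _ _).mp hz with rfl | hzy
      · have hyx : y.1 < z.1 := hidx y List.mem_cons_self
        unfold fjpKlt; omega
      · exact hyr z hzy

theorem foldl_insertBy_pw :
    ∀ (l acc : List (Int × Int × Int)), l.Pairwise (fun p q => p.1 < q.1) →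
      acc.Pairwise fjpKlt → (∀ a ∈ acc, ∀ y ∈ l, a.1 < y.1) →
      (l.foldl (fun acc x => PySem.List.insertBy (fun a b => decide (a.2.1 < b.2.1)) x acc) acc).Pairwise fjpKlt := by
  intro l
  induction l with
  | nil => intro acc _ hacc _; exact hacc
  | cons x t ih =>
    intro acc hl hacc hcross
    obtain ⟨hxt, hpt⟩ := List.pairwise_cons.mp hl
    simp only [List.foldl_cons]
    apply ih _ hpt
    · exact insertBy_pw x acc hacc (fun a ha => hcross a ha x List.mem_cons_self)
    · intro a ha y hy
      rcases (PySem.List.mem_insertBy _ _ _ _).mp ha with rfl | haa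
      · exact hxt y hy
      · exact hcross a haa y (List.mem_cons_of_mem _ hy)

theorem sorted_enum_pw (xs : List (Int × Int)) :
    (PySem.List.sorted (PySem.List.enumerate xs 0) (fun p => p.2.1)).Pairwise fjpKlt := by
  rw [PySem.List.sorted_eq_foldl_insertBy]
  exact foldl_insertBy_pw _ [] (PySem.List.pairwise_lt_enumerate xs 0) List.Pairwise.nil
    (by intro a ha; cases ha)

-- ===== VERDICT (by name: the statement is the Claim_ definition above) =====
theorem find_junction_position_spec : Claim_equal_find_junction_position := by
  intro ps pe xs _hdom
  unfold Spec_find_junction_position find_junction_position find_junction_position_alt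
  have hpw := sorted_enum_pw xs
  have hperm := PySem.List.sorted_perm (PySem.List.enumerate xs 0) (fun p => p.2.1) false
  have hmem : ∀ {z : Int × Int × Int},
      z ∈ PySem.List.sorted (PySem.List.enumerate xs 0) (fun p => p.2.1) ↔
      z ∈ PySem.List.enumerate xs 0 := fun {z} => hperm.mem_iff
  cases h1 : fjpMinBy (fun x => decide (ps < x.2.2 ∧ x.2.2 ≤ pe)) (PySem.List.enumerate xs 0) with
  | none =>
    have hall := fjpMinBy_none h1
    refine (loopA_eq_none ps pe _ hpw ?_)
    intro x hx hcx
    exact absurd hcx (of_decide_eq_false (hall x (hmem.mp hx)))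
  | some b =>
    change fjpLoopA ps pe _ =
      (match fjpMinBy (fun x => decide (b.2.1 < x.2.1 ∨ (b.2.1 = x.2.1 ∧ b.1 < x.1)))
          (PySem.List.enumerate xs 0) with
        | none => none
        | some c => some (b.2.2 - ps, b.1, c.1))
    obtain ⟨H1, _, H3⟩ := fjpMinBy_prop _ _ none b h1
    have hbmem : b ∈ PySem.List.enumerate xs 0 ∧ (ps < b.2.2 ∧ b.2.2 ≤ pe) := by
      rcases H1 with ⟨hm, hp⟩ | hax
      · exact ⟨hm, of_decide_eq_true hp⟩
      · cases hax
    have hbmin : ∀ x ∈ PySem.List.enumerate xs 0, (ps < x.2.2 ∧ x.2.2 ≤ pe) → ¬ fjpKlt x b :=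
      fun x hx hcx => H3 x hx (decide_eq_true hcx)
    cases h2 : fjpMinBy (fun x => decide (b.2.1 < x.2.1 ∨ (b.2.1 = x.2.1 ∧ b.1 < x.1))) (PySem.List.enumerate xs 0) with
    | none =>
      have hall := fjpMinBy_none h2
      have hnb : ∀ y ∈ PySem.List.enumerate xs 0, ¬ fjpKlt b y := by
        intro y hy hk
        exact (of_decide_eq_false (hall y hy)) hk
      refine loopA_eq_none ps pe _ hpw ?_
      intro x hx hcx y hy
      have hxe := hmem.mp hx
      have hxb : x = b := by
        by_cases hne : x = b
        · exact hne
        · have hfst : x.1 ≠ b.1 := fun hf => hne (enumerate_fst_inj hxe hbmem.1 hf)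
          rcases fjpKlt_total hfst with hk | hk
          · exact absurd hk (hbmin x hxe hcx)
          · exact absurd hk (hnb x hxe)
      subst hxb
      exact hnb y (hmem.mp hy)
    | some c =>
      obtain ⟨G1, _, G3⟩ := fjpMinBy_prop _ _ none c h2
      have hcmem : c ∈ PySem.List.enumerate xs 0 ∧ fjpKlt b c := by
        rcases G1 with ⟨hm, hp⟩ | hax
        · exact ⟨hm, by simpa [fjpKlt] using of_decide_eq_true hp⟩
        · cases hax
      have hcmin : ∀ x ∈ PySem.List.enumerate xs 0, fjpKlt b x → ¬ fjpKlt x c := by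
        intro x hx hbx
        exact G3 x hx (decide_eq_true (by simpa [fjpKlt] using hbx))
      exact loopA_eq_some ps pe _ b c hpw (hmem.mpr hbmem.1) hbmem.2
        (fun x hx hcx => hbmin x (hmem.mp hx) hcx)
        (hmem.mpr hcmem.1) hcmem.2
        (fun x hx hbx => hcmin x (hmem.mp hx) hbx)
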